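-- pv_equiv track=rewrite | github.com/wangxz0803-lab/MSG-Platform | src/msg_embedding/data/sources/internal_sim.py | _sites_to_rings
-- ===== SOURCE A (Python) =====
-- def _sites_to_rings(num_sites: int) -> int:
--     """Convert a site count to the minimum number of hex rings required.
--
--     Ring 0 = 1 site, ring 1 = 7, ring 2 = 19, ring 3 = 37, ...
--     Cumulative: ``1 + 3*r*(r+1)`` sites for ``r`` rings.
--     """
--     if num_sites <= 1:
--         return 0
--     r = 0
--     while True:
--         total = 1 + 3 * r * (r + 1)
--         if total >= num_sites:
--             return r
--         r += 1
--         if r > 20: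
--             return r
-- ===== SOURCE B (Python) =====
-- def _sites_to_rings(num_sites: int) -> int:
--     """Binary search for the smallest ring count r in [0, 21] with
--     1 + 3*r*(r+1) >= num_sites (the loop in A scans linearly and caps at 21)."""
--     if num_sites <= 1:
--         return 0
--     lo, hi = 0, 21
--     while lo < hi:
--         mid = (lo + hi) // 2
--         if 1 + 3 * mid * (mid + 1) >= num_sites:
--             hi = mid
--         else:
--             lo = mid + 1
--     return lo
-- ===== Notes on version B (the rewrite author's own statement) =====
-- stated objective: alternative
-- what changed: Replaced the linear scan over ring counts with a binary search on [0,21] for the smallest r with 1+3*r*(r+1) >= num_sites; the hard cap at 21 is the search's upper bound instead of a loop-exit branch.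
import Mathlib
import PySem

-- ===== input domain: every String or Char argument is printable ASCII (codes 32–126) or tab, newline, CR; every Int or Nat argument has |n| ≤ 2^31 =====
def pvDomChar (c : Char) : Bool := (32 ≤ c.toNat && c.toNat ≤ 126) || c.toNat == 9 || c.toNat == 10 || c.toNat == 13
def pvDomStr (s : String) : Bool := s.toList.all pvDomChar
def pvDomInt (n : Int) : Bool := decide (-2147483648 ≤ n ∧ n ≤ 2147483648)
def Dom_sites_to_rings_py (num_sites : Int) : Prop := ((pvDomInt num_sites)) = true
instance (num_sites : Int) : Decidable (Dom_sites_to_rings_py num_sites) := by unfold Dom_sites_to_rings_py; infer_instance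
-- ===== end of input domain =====

-- B replaces A's linear scan over ring counts by a binary search on [0,21]; objective: alternative algorithm.

-- ===== PORT A =====
-- A's 'while True' loop; it always returns within 21 iterations (r > 20 exits),
-- so the Nat argument is a plain totality fuel (21 at the call site), never exhausted.
def pvALoop (num_sites : Int) : Nat → Int → Int
  | 0, r => r
  | fuel + 1, r =>
    if 1 + 3 * r * (r + 1) ≥ num_sites then r
    else if r + 1 > 20 then r + 1
    else pvALoop num_sites fuel (r + 1)

def sites_to_rings_py (num_sites : Int) : Int :=
  if num_sites ≤ 1 then 0 else pvALoop num_sites 21 0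

-- ===== PORT B =====
-- B's 'while lo < hi' binary search; hi - lo starts at 21 and strictly shrinks,
-- so the Nat argument is a plain totality fuel (21 at the call site), never exhausted.
def pvBLoop (num_sites : Int) : Nat → Int → Int → Int
  | 0, lo, _ => lo
  | fuel + 1, lo, hi =>
    if lo < hi then
      let mid := PySem.Int.floordiv (lo + hi) 2
      if 1 + 3 * mid * (mid + 1) ≥ num_sites then pvBLoop num_sites fuel lo mid
      else pvBLoop num_sites fuel (mid + 1) hi
    else lo

def sites_to_rings_py_alt (num_sites : Int) : Int :=
  if num_sites ≤ 1 then 0 else pvBLoop num_sites 21 0 21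

-- ===== PRECONDITION & SPEC =====
def Spec_sites_to_rings_py (num_sites : Int) (out : Int) : Prop := out = sites_to_rings_py_alt num_sites
instance (num_sites : Int) (out : Int) : Decidable (Spec_sites_to_rings_py num_sites out) := by unfold Spec_sites_to_rings_py; infer_instance

-- ===== CLAIM (what is proved, stated in full; the proofs are below) =====
def Claim_equal_sites_to_rings_py : Prop := ∀ (num_sites : Int), Dom_sites_to_rings_py num_sites → Spec_sites_to_rings_py num_sites (sites_to_rings_py num_sites)

-- ===== LEMMAS AND PROOFS =====

-- Both programs agree on every site count up to the last one needing ≤ 20 rings (1261), checked by evaluation.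
set_option maxRecDepth 10000 in
theorem pvSmallEq : ∀ m : Nat, m < 1262 →
    sites_to_rings_py (m : Int) = sites_to_rings_py_alt (m : Int) := by decide

theorem pvALoop_big (n : Int) (hn : 1262 ≤ n) :
    ∀ (fuel : Nat) (r : Int), 0 ≤ r → r + fuel = 21 → pvALoop n fuel r = 21 := by
  intro fuel
  induction fuel with
  | zero => intro r _ hsum; simp [pvALoop]; omega
  | succ f ih =>
    intro r hr hsum
    have hle : 3 * r * (r + 1) ≤ 1260 := by
      nlinarith [mul_nonneg (by omega : (0:Int) ≤ 20 - r) (by omega : (0:Int) ≤ r + 1)]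
    simp only [pvALoop]
    rw [if_neg (by omega)]
    by_cases h20 : r + 1 > 20
    · rw [if_pos h20]; omega
    · rw [if_neg h20]; exact ih (r + 1) (by omega) (by omega)

theorem pvBLoop_big (n : Int) (hn : 1262 ≤ n) :
    ∀ (fuel : Nat) (lo : Int), 0 ≤ lo → lo ≤ 21 → 21 - lo ≤ (fuel : Int) →
      pvBLoop n fuel lo 21 = 21 := by
  intro fuel
  induction fuel with
  | zero => intro lo _ _ _; simp [pvBLoop]; omega
  | succ f ih =>
    intro lo h0 h21 hfuel
    simp only [pvBLoop]
    by_cases hlt : lo < 21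
    · rw [if_pos hlt]
      have hdiv : PySem.Int.floordiv (lo + 21) 2 = (lo + 21) / 2 := by
        simp only [PySem.Int.floordiv]
        rw [Int.fdiv_eq_ediv]; omega
      have hmid0 : 0 ≤ PySem.Int.floordiv (lo + 21) 2 := by rw [hdiv]; omega
      have hmid : PySem.Int.floordiv (lo + 21) 2 ≤ 20 := by rw [hdiv]; omega
      have hmidlo : lo ≤ PySem.Int.floordiv (lo + 21) 2 := by rw [hdiv]; omega
      have hle : 3 * (PySem.Int.floordiv (lo + 21) 2) * (PySem.Int.floordiv (lo + 21) 2 + 1) ≤ 1260 := by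
        nlinarith [mul_nonneg (by omega : (0:Int) ≤ 20 - PySem.Int.floordiv (lo + 21) 2)
          (by omega : (0:Int) ≤ PySem.Int.floordiv (lo + 21) 2 + 1)]
      rw [if_neg (by omega)]
      exact ih _ (by omega) (by omega) (by push_cast at hfuel ⊢; omega)
    · rw [if_neg hlt]; omega

-- ===== VERDICT (by name: the statement is the Claim_ definition above) =====
theorem sites_to_rings_py_spec : Claim_equal_sites_to_rings_py := by
  intro n _
  unfold Spec_sites_to_rings_py
  by_cases h1 : n ≤ 1
  · simp [sites_to_rings_py, sites_to_rings_py_alt, h1]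
  · by_cases hsmall : n ≤ 1261
    · have hn : n = ((n.toNat : Nat) : Int) := (Int.toNat_of_nonneg (by omega)).symm
      rw [hn]
      exact pvSmallEq n.toNat (by omega)
    · rw [sites_to_rings_py, sites_to_rings_py_alt, if_neg h1, if_neg h1]
      rw [pvALoop_big n (by omega) 21 0 (by omega) (by omega),
          pvBLoop_big n (by omega) 21 0 (by omega) (by omega) (by norm_num)]
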